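-- pv_equiv track=rewrite | github.com/DespoinaKs/Ergasies-python | askhsh1.py | findVertical
-- ===== SOURCE A (Python) =====
-- def findVertical(arr):
--     total = 0
--     for j in range(len(arr)-1):
--         counter = 0
--         for i in range(len(arr)-1):
--             if arr[i][j] == arr[i+1][j] and arr[i][j] == 1:
--                 counter = counter + 1
--             else:
--                 counter = 0
--             if counter == 3:
--                 total = total +1
--                 counter = 0
--     return total
-- ===== SOURCE B (Python) =====
-- def findVertical(arr):
--     total = 0
--     for j in range(len(arr)-1):
--         run = 0
--         for row in arr:
--             if row[j] == 1:
--                 run += 1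
--             else:
--                 if run > 0:
--                     total += (run - 1) // 3
--                 run = 0
--         if run > 0:
--             total += (run - 1) // 3
--     return total
-- ===== Notes on version B (the rewrite author's own statement) =====
-- stated objective: simpler
-- what changed: Replaces A's pair-by-pair modular counter (increment on each equal-1 pair, reset on break and on reaching 3) with a run-length pass per column that adds the closed form (run-1)//3 once per maximal run of 1s.
import Mathlib
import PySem

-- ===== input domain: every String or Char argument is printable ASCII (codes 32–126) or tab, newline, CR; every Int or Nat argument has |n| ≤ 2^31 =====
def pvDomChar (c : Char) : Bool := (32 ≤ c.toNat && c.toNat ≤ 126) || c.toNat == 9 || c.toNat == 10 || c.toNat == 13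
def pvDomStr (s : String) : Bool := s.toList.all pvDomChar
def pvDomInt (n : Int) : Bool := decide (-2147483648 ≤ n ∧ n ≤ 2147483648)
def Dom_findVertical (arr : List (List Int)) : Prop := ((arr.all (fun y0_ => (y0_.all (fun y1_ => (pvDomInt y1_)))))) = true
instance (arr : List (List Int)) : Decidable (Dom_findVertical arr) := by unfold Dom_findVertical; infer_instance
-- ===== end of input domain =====

-- B replaces A's pair-by-pair modular counter with a per-column run-length pass adding the closed form (run-1)//3 per maximal run of 1s; objective: simpler.


-- ===== PORT A =====
-- literal transliteration of A: two index loops over range(len(arr)-1); Pre_ guarantees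
-- every access arr[i][j] is in range, so the getD defaults are never reached.
def findVertical (arr : List (List Int)) : Int :=
  (List.range (arr.length - 1)).foldl (fun total j =>
    ((List.range (arr.length - 1)).foldl (fun (s : Int × Int) i =>
      let counter := if (arr.getD i []).getD j 0 = (arr.getD (i+1) []).getD j 0 ∧
                        (arr.getD i []).getD j 0 = 1 then s.2 + 1 else 0
      if counter = 3 then (s.1 + 1, 0) else (s.1, counter)) (total, 0)).1) 0

-- ===== PORT B =====
-- Source B's "if run > 0: total += (run-1)//3" flush step
def pvFlush (run : Int) : Int := if 0 < run then PySem.Int.floordiv (run - 1) 3 else 0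

def findVertical_alt (arr : List (List Int)) : Int :=
  (List.range (arr.length - 1)).foldl (fun total j =>
    let s := arr.foldl (fun (s : Int × Int) row =>
      if row.getD j 0 = 1 then (s.1, s.2 + 1) else (s.1 + pvFlush s.2, 0)) (total, 0)
    s.1 + pvFlush s.2) 0

-- ===== PRECONDITION & SPEC =====
-- Pre_ excludes exactly the ragged grids on which Python A raises IndexError:
-- when len(arr) ≥ 2 every row must provide the columns 0..len(arr)-2.
def Pre_findVertical (arr : List (List Int)) : Prop :=
  2 ≤ arr.length → ∀ row ∈ arr, arr.length - 1 ≤ row.length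
instance (arr : List (List Int)) : Decidable (Pre_findVertical arr) := by
  unfold Pre_findVertical; infer_instance

def pvWitness_findVertical : List (List Int) := [[1, 1], [1, 0]]

def Spec_findVertical (arr : List (List Int)) (out : Int) : Prop := out = findVertical_alt arr
instance (arr : List (List Int)) (out : Int) : Decidable (Spec_findVertical arr out) := by unfold Spec_findVertical; infer_instance

-- ===== CLAIM (what is proved, stated in full; the proofs are below) =====
def Claim_equal_findVertical : Prop := ∀ (arr : List (List Int)), Dom_findVertical arr → Pre_findVertical arr → Spec_findVertical arr (findVertical arr)

-- ===== LEMMAS AND PROOFS =====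

-- A's loop body as a step function (definitionally the port's lambda body)
def astepF (s : Int × Int) (a b : Int) : Int × Int :=
  let counter := if a = b ∧ a = 1 then s.2 + 1 else 0
  if counter = 3 then (s.1 + 1, 0) else (s.1, counter)

-- B's loop body as a step function
def bstepF (s : Int × Int) (x : Int) : Int × Int :=
  if x = 1 then (s.1, s.2 + 1) else (s.1 + pvFlush s.2, 0)

-- A's inner loop as structural recursion over the column, carrying the previous cell
def aPairs (prev : Int) (xs : List Int) (t c : Int) : Int :=
  match xs with
  | [] => t
  | x :: xs =>
    let c' := if prev = x ∧ prev = 1 then c + 1 else 0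
    if c' = 3 then aPairs x xs (t + 1) 0 else aPairs x xs t c'

theorem cell_eq (arr : List (List Int)) (j : Nat) :
    ∀ i, (arr.getD i []).getD j 0 = (arr.map (fun r => r.getD j 0)).getD i 0 := by
  induction arr with
  | nil => intro i; simp [List.getD]
  | cons r rest ih =>
    intro i
    cases i with
    | zero => simp [List.getD]
    | succ i => simpa [List.getD] using ih i

theorem A_range (xs : List Int) : ∀ (prev t c : Int),
    ((List.range xs.length).foldl
      (fun s i => astepF s ((prev :: xs).getD i 0) ((prev :: xs).getD (i+1) 0)) (t, c)).1
      = aPairs prev xs t c := by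
  induction xs with
  | nil => intro prev t c; simp [aPairs]
  | cons x xs ih =>
    intro prev t c
    rw [show (x :: xs).length = xs.length + 1 from rfl, List.range_succ_eq_map,
        List.foldl_cons, List.foldl_map]
    have hstep : (fun (s : Int × Int) (i : Nat) =>
        astepF s ((prev :: x :: xs).getD (Nat.succ i) 0) ((prev :: x :: xs).getD (Nat.succ i + 1) 0))
          = (fun (s : Int × Int) (i : Nat) =>
              astepF s ((x :: xs).getD i 0) ((x :: xs).getD (i+1) 0)) := rfl
    rw [hstep,
        show astepF (t, c) ((prev :: x :: xs).getD 0 0) ((prev :: x :: xs).getD (0+1) 0)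
          = astepF (t, c) prev x from rfl]
    have hA : aPairs prev (x :: xs) t c
        = aPairs x xs (astepF (t, c) prev x).1 (astepF (t, c) prev x).2 := by
      simp only [aPairs, astepF]
      split_ifs <;> rfl
    rw [hA]
    generalize astepF (t, c) prev x = s0
    obtain ⟨t', c'⟩ := s0
    exact ih x t' c'

theorem pvFlush_pos {run : Int} (h : 1 ≤ run) : pvFlush run = (run - 1) / 3 := by
  unfold pvFlush
  rw [if_pos (by omega), PySem.Int.floordiv_eq_ediv_of_pos (by omega)]

theorem pvFlush_zero : pvFlush 0 = 0 := by simp [pvFlush]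

-- core invariant: A's modular pair counter vs B's run length, per column
theorem bcore (xs : List Int) : ∀ (prev tA c tB run : Int),
    (prev = 1 → 1 ≤ run ∧ c = (run - 1) % 3 ∧ tA = tB + (run - 1) / 3) →
    (prev ≠ 1 → run = 0 ∧ c = 0 ∧ tA = tB) →
    aPairs prev xs tA c = (xs.foldl bstepF (tB, run)).1 + pvFlush (xs.foldl bstepF (tB, run)).2 := by
  induction xs with
  | nil =>
    intro prev tA c tB run h1 h2
    simp only [List.foldl_nil, aPairs]
    by_cases hp : prev = 1
    · obtain ⟨hr, -, ht⟩ := h1 hp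
      rw [pvFlush_pos hr, ht]
    · obtain ⟨hr, -, ht⟩ := h2 hp
      rw [hr, pvFlush_zero, ht, add_zero]
  | cons x xs ih =>
    intro prev tA c tB run h1 h2
    rw [List.foldl_cons]
    by_cases hx : x = 1
    · by_cases hp : prev = 1
      · -- good pair: the run continues
        obtain ⟨hr, hc, ht⟩ := h1 hp
        by_cases h3 : c + 1 = 3
        · rw [show aPairs prev (x :: xs) tA c = aPairs x xs (tA + 1) 0 by
              simp [aPairs, hp, hx, h3],
            show bstepF (tB, run) x = (tB, run + 1) by simp [bstepF, hx]]
          exact ih x (tA + 1) 0 tB (run + 1)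
            (fun _ => ⟨by omega, by omega, by omega⟩) (fun h => absurd hx h)
        · rw [show aPairs prev (x :: xs) tA c = aPairs x xs tA (c + 1) by
              simp [aPairs, hp, hx, h3],
            show bstepF (tB, run) x = (tB, run + 1) by simp [bstepF, hx]]
          exact ih x tA (c + 1) tB (run + 1)
            (fun _ => ⟨by omega, by omega, by omega⟩) (fun h => absurd hx h)
      · -- a run starts at x
        obtain ⟨hr, hc, ht⟩ := h2 hp
        rw [show aPairs prev (x :: xs) tA c = aPairs x xs tA 0 by simp [aPairs, hp],
            show bstepF (tB, run) x = (tB, run + 1) by simp [bstepF, hx]]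
        exact ih x tA 0 tB (run + 1)
          (fun _ => ⟨by omega, by omega, by omega⟩) (fun h => absurd hx h)
    · -- the run (if any) ends: B flushes
      have hcond : ¬(prev = x ∧ prev = 1) := fun h => hx (h.1.symm.trans h.2)
      rw [show aPairs prev (x :: xs) tA c = aPairs x xs tA 0 by
            simp only [aPairs]
            rw [if_neg hcond, if_neg (by norm_num : ¬((0:Int) = 3))],
          show bstepF (tB, run) x = (tB + pvFlush run, 0) by simp [bstepF, hx]]
      by_cases hp : prev = 1
      · obtain ⟨hr, hc, ht⟩ := h1 hp
        exact ih x tA 0 (tB + pvFlush run) 0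
          (fun h => absurd h hx) (fun _ => ⟨rfl, rfl, by rw [ht, pvFlush_pos hr]⟩)
      · obtain ⟨hr, hc, ht⟩ := h2 hp
        exact ih x tA 0 (tB + pvFlush run) 0
          (fun h => absurd h hx)
          (fun _ => ⟨rfl, rfl, by rw [ht, hr, pvFlush_zero, add_zero]⟩)

theorem foldl_funext {α β : Type} (f g : α → β → α) (l : List β) (init : α)
    (h : ∀ a b, f a b = g a b) : l.foldl f init = l.foldl g init := by
  rw [show f = g from funext fun a => funext fun b => h a b]

-- per-column equality of the two inner loops
theorem col_eq (arr : List (List Int)) (harr : arr ≠ []) (j : Nat) (t : Int) :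
    ((List.range (arr.length - 1)).foldl (fun (s : Int × Int) i =>
      let counter := if (arr.getD i []).getD j 0 = (arr.getD (i+1) []).getD j 0 ∧
                        (arr.getD i []).getD j 0 = 1 then s.2 + 1 else 0
      if counter = 3 then (s.1 + 1, 0) else (s.1, counter)) (t, 0)).1
    = (arr.foldl (fun (s : Int × Int) row =>
        if row.getD j 0 = 1 then (s.1, s.2 + 1) else (s.1 + pvFlush s.2, 0)) (t, 0)).1
      + pvFlush (arr.foldl (fun (s : Int × Int) row =>
        if row.getD j 0 = 1 then (s.1, s.2 + 1) else (s.1 + pvFlush s.2, 0)) (t, 0)).2 := by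
  obtain ⟨r0, rest, hcol⟩ : ∃ r0 rest, arr.map (fun r => r.getD j 0) = r0 :: rest := by
    cases harr' : arr with
    | nil => exact absurd harr' harr
    | cons a l => exact ⟨_, _, rfl⟩
  have hlen : arr.length - 1 = rest.length := by
    have h := congrArg List.length hcol
    simp only [List.length_map, List.length_cons] at h
    omega
  have hA : (fun (s : Int × Int) (i : Nat) =>
      let counter := if (arr.getD i []).getD j 0 = (arr.getD (i+1) []).getD j 0 ∧
                        (arr.getD i []).getD j 0 = 1 then s.2 + 1 else 0
      if counter = 3 then (s.1 + 1, 0) else (s.1, counter))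
      = (fun (s : Int × Int) (i : Nat) =>
          astepF s ((r0 :: rest).getD i 0) ((r0 :: rest).getD (i+1) 0)) := by
    funext s i
    rw [← hcol, ← cell_eq arr j i, ← cell_eq arr j (i+1)]
    rfl
  have hB : arr.foldl (fun (s : Int × Int) row =>
      if row.getD j 0 = 1 then (s.1, s.2 + 1) else (s.1 + pvFlush s.2, 0)) (t, 0)
      = (r0 :: rest).foldl bstepF (t, 0) := by
    rw [← hcol, List.foldl_map]
    rfl
  rw [hA, hB, hlen, A_range rest r0 t 0, List.foldl_cons]
  by_cases h0 : r0 = 1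
  · rw [show bstepF (t, 0) r0 = (t, 0 + 1) by simp [bstepF, h0]]
    exact bcore rest r0 t 0 t (0 + 1)
      (fun _ => ⟨by omega, by norm_num, by norm_num⟩) (fun h => absurd h0 h)
  · rw [show bstepF (t, 0) r0 = (t + pvFlush 0, 0) by simp [bstepF, h0]]
    exact bcore rest r0 t 0 (t + pvFlush 0) 0
      (fun h => absurd h h0)
      (fun _ => ⟨rfl, rfl, by rw [pvFlush_zero, add_zero]⟩)

-- ===== VERDICT (by name: the statement is the Claim_ definition above) =====
theorem findVertical_spec : Claim_equal_findVertical := by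
  intro arr _ _
  unfold Spec_findVertical findVertical findVertical_alt
  rcases arr with _ | ⟨a, l⟩
  · rfl
  · exact foldl_funext _ _ _ _ (fun total j => col_eq (a :: l) (by simp) j total)
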